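-- pv_equiv track=rewrite | github.com/srmallick98/Invincix-code | total_load.py | total_load
-- ===== SOURCE A (Python) =====
-- def total_load(n):
--     if (n <= 0):
--         return 0
--
--     count = [0] * (n + 1)
--     count[1] = 1
--
--     load = count[0] + count[1]
--
--     # Add remaining terms
--     for i in range(2, n + 1):
--         count[i] = count[i - 1] + count[i - 2]
--         load = load + count[i]
--
--     return load
-- ===== SOURCE B (Python) =====
-- def total_load(n):
--     # Sum of Fibonacci numbers F(0)..F(n) equals F(n+2) - 1; compute F via fast doubling.
--     if n <= 0:
--         return 0
--     def fib_pair(k):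
--         # returns (F(k), F(k+1)) by fast doubling
--         if k == 0:
--             return (0, 1)
--         a, b = fib_pair(k // 2)
--         c = a * (2 * b - a)
--         d = a * a + b * b
--         if k % 2:
--             return (d, c + d)
--         return (c, d)
--     return fib_pair(n + 2)[0] - 1
-- ===== Notes on version B (the rewrite author's own statement) =====
-- stated objective: faster
-- what changed: Replaced the O(n) table-building loop by fast-doubling Fibonacci plus the closed form sum F(0..n) = F(n+2) - 1.
import Mathlib
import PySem

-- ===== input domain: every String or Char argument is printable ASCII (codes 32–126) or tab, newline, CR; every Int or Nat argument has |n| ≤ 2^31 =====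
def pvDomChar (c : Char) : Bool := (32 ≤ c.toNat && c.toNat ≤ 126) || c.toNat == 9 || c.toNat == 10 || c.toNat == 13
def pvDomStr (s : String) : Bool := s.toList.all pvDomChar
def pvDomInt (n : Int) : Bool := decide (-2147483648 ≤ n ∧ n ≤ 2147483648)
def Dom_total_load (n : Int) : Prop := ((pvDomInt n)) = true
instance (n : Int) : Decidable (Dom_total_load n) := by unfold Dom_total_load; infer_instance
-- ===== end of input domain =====

-- B replaces A's O(n) table-building loop by fast-doubling Fibonacci and the identity sum F(0..n) = F(n+2) - 1 (objective: faster, asymptotic).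

-- ===== PORT A =====
-- count[i] lookups/stores are always in range in Python (list has length n+1, indices ≤ n),
-- so pyGetD with default 0 computes exactly what Python's count[i] computes.
def total_load (n : Int) : Int :=
  if n ≤ 0 then 0
  else
    let count := (List.replicate (n + 1).toNat (0 : Int)).set 1 1
    let load := PySem.List.pyGetD count 0 0 + PySem.List.pyGetD count 1 0
    let st := (PySem.List.pyRange 2 (n + 1) 1).foldl
      (fun (st : List Int × Int) i =>
        let v := PySem.List.pyGetD st.1 (i - 1) 0 + PySem.List.pyGetD st.1 (i - 2) 0
        (st.1.set i.toNat v, st.2 + v)) (count, load)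
    st.2

-- ===== PORT B =====
-- fast doubling: fibPair k = (F(k), F(k+1))
def fibPair (k : Nat) : Int × Int :=
  if h : k = 0 then (0, 1)
  else
    let p := fibPair (k / 2)
    let c := p.1 * (2 * p.2 - p.1)
    let d := p.1 * p.1 + p.2 * p.2
    if k % 2 = 1 then (d, c + d) else (c, d)
decreasing_by exact Nat.div_lt_self (Nat.pos_of_ne_zero h) (by norm_num)

def total_load_alt (n : Int) : Int :=
  if n ≤ 0 then 0 else (fibPair (n + 2).toNat).1 - 1

-- ===== PRECONDITION & SPEC =====
def Spec_total_load (n : Int) (out : Int) : Prop := out = total_load_alt n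
instance (n : Int) (out : Int) : Decidable (Spec_total_load n out) := by unfold Spec_total_load; infer_instance

-- ===== CLAIM (what is proved, stated in full; the proofs are below) =====
def Claim_equal_total_load : Prop := ∀ (n : Int), Dom_total_load n → Spec_total_load n (total_load n)

-- ===== LEMMAS AND PROOFS =====

theorem fibPair_eq (k : Nat) : fibPair k = ((Nat.fib k : Int), (Nat.fib (k + 1) : Int)) := by
  induction k using Nat.strong_induction_on with
  | _ k ih =>
    rw [fibPair]
    by_cases h : k = 0
    · simp [h]
    · have ih2 := ih (k / 2) (Nat.div_lt_self (Nat.pos_of_ne_zero h) (by norm_num))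
      simp only [h, dite_false, ih2]
      set q := k / 2 with hq
      have hfle : Nat.fib q ≤ 2 * Nat.fib (q + 1) :=
        le_trans (Nat.fib_le_fib_succ) (by omega)
      have h2m : (Nat.fib (2 * q) : Int) =
          (Nat.fib q : Int) * (2 * (Nat.fib (q + 1) : Int) - (Nat.fib q : Int)) := by
        have := Nat.fib_two_mul q
        zify [hfle] at this
        linarith [this]
      have h2m1 : (Nat.fib (2 * q + 1) : Int) =
          (Nat.fib (q + 1) : Int) * (Nat.fib (q + 1) : Int) +
          (Nat.fib q : Int) * (Nat.fib q : Int) := by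
        have := Nat.fib_two_mul_add_one q
        zify at this
        rw [this]; ring
      have hsum := @Nat.fib_add_two (2 * q)
      zify at hsum
      rcases Nat.even_or_odd k with he | ho
      · have hk2 : k % 2 = 0 := Nat.even_iff.mp he
        rw [show k = 2 * q by omega, if_neg (by omega : ¬ (2 * q) % 2 = 1),
            Prod.mk.injEq, h2m, h2m1]
        exact ⟨by ring, by ring⟩
      · have hk2 : k % 2 = 1 := Nat.odd_iff.mp ho
        rw [show k = 2 * q + 1 by omega, if_pos (by omega : (2 * q + 1) % 2 = 1),
            Prod.mk.injEq, show 2 * q + 1 + 1 = 2 * q + 2 by ring, hsum, h2m, h2m1]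
        exact ⟨by ring, by ring⟩

-- the A-side table after scanning up to index j: fib at positions ≤ j, zeros beyond
def fibList (len j : Nat) : List Int :=
  (List.range len).map (fun t => if t ≤ j then (Nat.fib t : Int) else 0)

theorem fibList_getD {len j t : Nat} (ht : t < len) :
    (fibList len j).getD t 0 = if t ≤ j then (Nat.fib t : Int) else 0 := by
  exact PySem.List.getD_map_range (fun t => if t ≤ j then (Nat.fib t : Int) else 0) len t 0 ht

theorem fibList_set {len j : Nat} (hj : j + 1 < len) :
    (fibList len j).set (j + 1) (Nat.fib (j + 1) : Int) = fibList len (j + 1) := by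
  apply List.ext_getElem
  · simp [fibList]
  · intro t h1 h2
    have ht : t < len := by simpa [fibList] using h2
    rw [List.getElem_set]
    simp only [fibList, List.getElem_map, List.getElem_range]
    by_cases hq : j + 1 = t
    · subst hq; simp
    · rw [if_neg hq]
      split_ifs <;> first | rfl | omega

-- loop invariant for A's fold
theorem loopA (m : Nat) : ∀ j : Nat, 1 ≤ j → j ≤ m →
    (PySem.List.pyRange 2 ((j : Int) + 1) 1).foldl
      (fun (st : List Int × Int) i =>
        let v := PySem.List.pyGetD st.1 (i - 1) 0 + PySem.List.pyGetD st.1 (i - 2) 0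
        (st.1.set i.toNat v, st.2 + v)) (fibList (m + 1) 1, 1)
      = (fibList (m + 1) j, (Nat.fib (j + 2) : Int) - 1) := by
  intro j hj
  induction j, hj using Nat.le_induction with
  | base =>
    intro _
    rw [PySem.List.pyRange_one_eq_nil (by norm_num)]
    simp [Nat.fib]
  | succ j _hj ih =>
    intro hle
    have hjm : j ≤ m := by omega
    have hsplit : PySem.List.pyRange 2 (((j : Nat) + 1 : Int) + 1) 1 =
        PySem.List.pyRange 2 ((j : Int) + 1) 1 ++ [(j : Int) + 1] := by
      push_cast
      exact PySem.List.pyRange_one_succ_right (by omega)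
    push_cast at hsplit ⊢
    rw [hsplit, List.foldl_append, ih hjm]
    simp only [List.foldl_cons, List.foldl_nil]
    have e1 : (j : Int) + 1 - 1 = ((j : Nat) : Int) := by omega
    have e2 : (j : Int) + 1 - 2 = ((j - 1 : Nat) : Int) := by omega
    have e3 : ((j : Int) + 1).toNat = j + 1 := by omega
    rw [e1, e2, e3, PySem.List.pyGetD_natCast, PySem.List.pyGetD_natCast,
        fibList_getD (by omega), fibList_getD (by omega)]
    have hfib : (Nat.fib j : Int) + (Nat.fib (j - 1) : Int) = (Nat.fib (j + 1) : Int) := by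
      have hj1 : j + 1 = (j - 1) + 2 := by omega
      have := @Nat.fib_add_two (j - 1)
      have hjj : (j - 1) + 1 = j := by omega
      rw [hj1, this, hjj]
      push_cast; ring
    have hfib2 : (Nat.fib (j + 2) : Int) - 1 + (Nat.fib (j + 1) : Int) =
        (Nat.fib (j + 1 + 2) : Int) - 1 := by
      have := @Nat.fib_add_two (j + 1)
      rw [this]
      push_cast; ring
    simp only [if_pos (le_refl j), if_pos (by omega : j - 1 ≤ j)]
    rw [hfib, fibList_set (by omega), hfib2]

theorem init_count (m : Nat) :
    (List.replicate (m + 1) (0 : Int)).set 1 1 = fibList (m + 1) 1 := by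
  apply List.ext_getElem
  · simp [fibList]
  · intro t h1 h2
    rw [List.getElem_set]
    simp only [List.getElem_replicate, fibList, List.getElem_map, List.getElem_range]
    rcases Nat.lt_or_ge t 2 with h | h
    · interval_cases t <;> simp
    · rw [if_neg (by omega), if_neg (by omega)]

-- ===== VERDICT (by name: the statement is the Claim_ definition above) =====
theorem total_load_spec : Claim_equal_total_load := by
  intro n _
  unfold Spec_total_load total_load total_load_alt
  by_cases hn : n ≤ 0
  · simp [hn]
  · simp only [hn, if_false]
    have hm : n = ((n.toNat : Int)) := by omega
    set m := n.toNat with hmdef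
    have hm1 : 1 ≤ m := by omega
    have hlen : (n + 1).toNat = m + 1 := by omega
    have hrange : n + 1 = (m : Int) + 1 := by omega
    rw [hlen, hrange, init_count m]
    have hload : PySem.List.pyGetD (fibList (m + 1) 1) 0 0 +
        PySem.List.pyGetD (fibList (m + 1) 1) 1 0 = 1 := by
      have g0 := PySem.List.pyGetD_natCast (fibList (m + 1) 1) 0 0
      have g1 := PySem.List.pyGetD_natCast (fibList (m + 1) 1) 1 0
      push_cast at g0 g1
      rw [g0, g1, fibList_getD (by omega), fibList_getD (by omega)]
      simp [Nat.fib]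
    rw [hload, loopA m m hm1 (le_refl m)]
    have h2 : (n + 2).toNat = m + 2 := by omega
    rw [h2, fibPair_eq]
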